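-- pv_equiv track=rewrite | github.com/mblazhko/transcripting-dialogue | scripts.py | extract_speaker_name
-- ===== SOURCE A (Python) =====
-- def extract_speaker_name(dialogue) -> str | None:
--     lines = dialogue.split('\n')
--     speaker_name = None
--
--     for line in lines:
--         if ":" in line:
--             speaker_name, _ = line.split(":", 1)
--             break
--
--     return speaker_name
-- ===== SOURCE B (Python) =====
-- def extract_speaker_name(dialogue) -> str | None:
--     cur = []
--     for ch in dialogue:
--         if ch == ':':
--             return ''.join(cur)
--         if ch == '\n':
--             cur = []
--         else:
--             cur.append(ch)
--     return None
-- ===== Notes on version B (the rewrite author's own statement) =====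
-- stated objective: alternative
-- what changed: Replaces split-into-lines plus a loop over the materialized line list by a single character scan that returns the accumulated current-line prefix at the first colon and resets it at each newline.
import Mathlib
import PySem

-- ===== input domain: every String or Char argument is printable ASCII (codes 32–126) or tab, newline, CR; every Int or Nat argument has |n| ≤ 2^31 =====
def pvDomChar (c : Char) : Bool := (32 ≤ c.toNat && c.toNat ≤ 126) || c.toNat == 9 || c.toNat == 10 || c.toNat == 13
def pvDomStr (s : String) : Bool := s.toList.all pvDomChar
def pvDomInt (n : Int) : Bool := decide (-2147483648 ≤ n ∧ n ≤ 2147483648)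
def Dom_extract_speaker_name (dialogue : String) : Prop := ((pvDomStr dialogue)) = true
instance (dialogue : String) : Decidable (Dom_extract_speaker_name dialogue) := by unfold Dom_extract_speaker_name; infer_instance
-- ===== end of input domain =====

-- B replaces split-into-lines plus a loop over the line list by a single character scan
-- that returns the accumulated current-line prefix at the first colon (objective: alternative).


-- ===== PORT A =====
-- the 'for line in lines: …; break' loop of A
def extractLoopA : List (List Char) → Option String
  | [] => none
  | line :: rest =>
      if PySem.Chars.isIn [':'] line then
        -- speaker_name, _ = line.split(":", 1)  (tuple unpack takes the first piece)
        match PySem.Chars.splitOnMax line [':'] 1 with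
        | a :: _ => some (String.mk a)
        | [] => none
      else extractLoopA rest

def extract_speaker_name (dialogue : String) : Option String :=
  extractLoopA (PySem.Chars.splitOn dialogue.toList ['\n'])

-- ===== PORT B =====
-- single scan: return current-line prefix at the first ':', reset it at '\n'
def scanB : List Char → List Char → Option String
  | [], _ => none
  | c :: rest, cur =>
      if c = ':' then some (String.mk cur)
      else if c = '\n' then scanB rest []
      else scanB rest (cur ++ [c])

def extract_speaker_name_alt (dialogue : String) : Option String :=
  scanB dialogue.toList []

-- ===== PRECONDITION & SPEC =====
def Spec_extract_speaker_name (dialogue : String) (out : Option String) : Prop := out = extract_speaker_name_alt dialogue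
instance (dialogue : String) (out : Option String) : Decidable (Spec_extract_speaker_name dialogue out) := by unfold Spec_extract_speaker_name; infer_instance

-- ===== CLAIM (what is proved, stated in full; the proofs are below) =====
def Claim_equal_extract_speaker_name : Prop := ∀ (dialogue : String), Dom_extract_speaker_name dialogue → Spec_extract_speaker_name dialogue (extract_speaker_name dialogue)

-- ===== LEMMAS AND PROOFS =====

-- reference single-character split used to characterise both ports
def mySplit : List Char → List (List Char)
  | [] => [[]]
  | c :: rest => if c = '\n' then [] :: mySplit rest else (mySplit rest).modifyHead (c :: ·)

theorem mySplit_ne_nil (l : List Char) : mySplit l ≠ [] := by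
  induction l with
  | nil => simp [mySplit]
  | cons c rest ih =>
    simp only [mySplit]
    split_ifs <;> simp_all [List.modifyHead]
    cases h : mySplit rest <;> simp_all

theorem splitOn_go_char (l : List Char) : ∀ (fuel : Nat) (cur : List Char) (acc : List (List Char)),
    l.length ≤ fuel →
    PySem.Chars.splitOn.go ['\n'] fuel l cur acc
      = acc.reverse ++ (mySplit l).modifyHead (cur.reverse ++ ·) := by
  induction l with
  | nil =>
    intro fuel cur acc _
    cases fuel <;> simp [PySem.Chars.splitOn.go, mySplit]
  | cons c rest ih =>
    intro fuel cur acc hf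
    cases fuel with
    | zero => simp at hf
    | succ f =>
      simp only [PySem.Chars.splitOn.go]
      by_cases hc : c = '\n'
      · subst hc
        have : List.isPrefixOf ['\n'] ('\n' :: rest) = true := by simp [List.isPrefixOf]
        rw [if_pos this]
        have hd : List.drop (['\n'] : List Char).length ('\n' :: rest) = rest := rfl
        rw [hd, ih f [] (cur.reverse :: acc) (by simpa using Nat.le_of_succ_le_succ hf)]
        cases hms : mySplit rest <;> simp [mySplit, hms, List.modifyHead]
      · have : List.isPrefixOf ['\n'] (c :: rest) = false := by
          simp [List.isPrefixOf]; exact fun h => absurd h.symm hc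
        rw [if_neg (by simp [this])]
        rw [ih f (c :: cur) acc (by simpa using Nat.le_of_succ_le_succ hf)]
        obtain ⟨h, t, hht⟩ : ∃ h t, mySplit rest = h :: t := by
          cases hms : mySplit rest with
          | nil => exact absurd hms (mySplit_ne_nil rest)
          | cons h t => exact ⟨h, t, rfl⟩
        simp [mySplit, hc, hht, List.modifyHead]

theorem splitOn_char (s : List Char) :
    PySem.Chars.splitOn s ['\n'] = mySplit s := by
  unfold PySem.Chars.splitOn
  rw [splitOn_go_char s (s.length + 1) [] [] (by omega)]
  cases mySplit s <;> simp

theorem splitOnMax_go_zero (l : List Char) : ∀ (fuel : Nat) (cur : List Char) (acc : List (List Char)),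
    PySem.Chars.splitOnMax.go [':'] fuel 0 l cur acc = acc.reverse ++ [cur.reverse ++ l] := by
  induction l with
  | nil => intro fuel cur acc; cases fuel <;> simp [PySem.Chars.splitOnMax.go]
  | cons c rest _ => intro fuel cur acc; cases fuel <;> simp [PySem.Chars.splitOnMax.go]

theorem splitOnMax_go_one (l : List Char) : ∀ (fuel : Nat) (cur : List Char) (acc : List (List Char)),
    l.length ≤ fuel → ':' ∈ l →
    PySem.Chars.splitOnMax.go [':'] fuel 1 l cur acc
      = acc.reverse ++ [cur.reverse ++ l.takeWhile (· ≠ ':'),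
                        l.drop ((l.takeWhile (· ≠ ':')).length + 1)] := by
  induction l with
  | nil => intro _ _ _ _ hm; simp at hm
  | cons c rest ih =>
    intro fuel cur acc hf hm
    cases fuel with
    | zero => simp at hf
    | succ f =>
      simp only [PySem.Chars.splitOnMax.go]
      by_cases hc : c = ':'
      · subst hc
        have : List.isPrefixOf [':'] (':' :: rest) = true := by simp [List.isPrefixOf]
        rw [if_neg (by omega), if_pos this]
        rw [splitOnMax_go_zero]
        simp [List.takeWhile]
      · have hpf : List.isPrefixOf [':'] (c :: rest) = false := by
          simp [List.isPrefixOf]; exact fun h => absurd h.symm hc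
        rw [if_neg (by omega), if_neg (by simp [hpf])]
        have hm' : ':' ∈ rest := by
          cases hm with
          | head => exact absurd rfl hc
          | tail _ h => exact h
        rw [ih f (c :: cur) acc (by simpa using Nat.le_of_succ_le_succ hf) hm']
        simp [List.takeWhile, hc]

theorem splitOnMax_one (l : List Char) (hm : ':' ∈ l) :
    PySem.Chars.splitOnMax l [':'] 1
      = [l.takeWhile (· ≠ ':'), l.drop ((l.takeWhile (· ≠ ':')).length + 1)] := by
  unfold PySem.Chars.splitOnMax
  rw [if_neg (by omega)]
  have := splitOnMax_go_one l (l.length + 1) [] [] (by omega) hm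
  simpa using this

theorem isIn_colon (l : List Char) : PySem.Chars.isIn [':'] l = true ↔ ':' ∈ l := by
  rw [PySem.Chars.isIn_iff_infix]
  exact List.singleton_infix_iff ':' l

theorem scanB_eq_loopA (cs : List Char) : ∀ (cur : List Char), ':' ∉ cur →
    scanB cs cur = extractLoopA ((mySplit cs).modifyHead (cur ++ ·)) := by
  induction cs with
  | nil =>
    intro cur hcur
    simp only [scanB, mySplit, List.modifyHead, List.append_nil, extractLoopA]
    rw [if_neg (fun hh => hcur ((isIn_colon cur).1 hh))]
  | cons c rest ih =>
    intro cur hcur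
    obtain ⟨h, t, hht⟩ : ∃ h t, mySplit rest = h :: t := by
      cases hms : mySplit rest with
      | nil => exact absurd hms (mySplit_ne_nil rest)
      | cons h t => exact ⟨h, t, rfl⟩
    by_cases hc : c = ':'
    · subst hc
      have hms : mySplit (':' :: rest) = (':' :: h) :: t := by
        simp [mySplit, hht, List.modifyHead]
      simp only [scanB, hms, List.modifyHead]
      have hline : cur ++ ':' :: h = (cur ++ [':']) ++ h := by simp
      simp only [extractLoopA]
      rw [if_pos ((isIn_colon _).2 (by simp))]
      rw [splitOnMax_one _ (by simp)]
      have htw : List.takeWhile (· ≠ ':') (cur ++ ':' :: h) = cur := by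
        rw [List.takeWhile_append_of_pos (by intro a ha; simpa using fun (he : a = ':') => hcur (he ▸ ha))]
        simp [List.takeWhile]
      rw [htw]
      simp
    · by_cases hn : c = '\n'
      · subst hn
        have hms : mySplit ('\n' :: rest) = [] :: mySplit rest := by simp [mySplit]
        simp only [scanB, if_neg hc, hms, List.modifyHead]
        simp only [extractLoopA, List.append_nil]
        rw [if_neg (fun hh => hcur ((isIn_colon cur).1 hh))]
        rw [ih [] (by simp)]
        cases mySplit rest <;> simp [List.modifyHead]
      · have hms : mySplit (c :: rest) = (c :: h) :: t := by
          simp [mySplit, hn, hht, List.modifyHead]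
        simp only [scanB, if_neg hc, if_neg hn, hms, List.modifyHead]
        rw [ih (cur ++ [c]) (by
          intro hmem
          rcases List.mem_append.1 hmem with h1 | h1
          · exact hcur h1
          · simp at h1; exact hc h1.symm)]
        simp [hht, List.modifyHead]

-- ===== VERDICT (by name: the statement is the Claim_ definition above) =====
theorem extract_speaker_name_spec : Claim_equal_extract_speaker_name := by
  intro dialogue _
  unfold Spec_extract_speaker_name extract_speaker_name extract_speaker_name_alt
  rw [splitOn_char, scanB_eq_loopA dialogue.toList [] (by simp)]
  cases hms : mySplit dialogue.toList <;> simp [List.modifyHead]
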